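-- pv_equiv track=rewrite | github.com/Masrt200/WoC2k19 | MAIN_FILES/Decrypting/rot.py | rotate_brute
-- ===== SOURCE A (Python) =====
-- def rotate(sometext,skip):
-- 	othertext=''
-- 	alphabet='abcdefghijklmnopqrstuvwxyz'
-- 	skip=int(skip)%26
-- 	rot=alphabet[skip:]+alphabet[:skip]
-- 		#for rot13, rot13='nopqrstuvwxyzabcdefghijklm'
-- 	for x in sometext:
-- 		ct=0
-- 		if x.isupper():
-- 			ct+=1
-- 			x=x.lower()
--
-- 		if x in alphabet:
-- 			index=rot.index(x)
-- 			add=alphabet[index]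
-- 			if ct==1:
-- 				add=add.upper()
-- 			othertext+=add
-- 		else:
-- 			othertext+=x
--
-- 	return othertext
--
-- def rotate_brute(sometext):
-- 	brutejunk=''
-- 	i=1
-- 	while i<26:
-- 		plaintext=''
-- 		plaintext=rotate(sometext,i)
--
-- 		brutejunk+='ROT %s: ' % i+plaintext+'\n'
-- 		i+=1
--
-- 	return brutejunk
-- ===== SOURCE B (Python) =====
-- def rotate_brute(sometext):
--     alphabet = 'abcdefghijklmnopqrstuvwxyz'
--     # one pass: classify every character once
--     tokens = []
--     for ch in sometext:
--         up = ch.isupper()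
--         lc = ch.lower() if up else ch
--         if lc in alphabet:
--             tokens.append((alphabet.index(lc), up))
--         else:
--             tokens.append(lc)
--     # fan out to the 25 rotations from the recorded indices
--     lines = []
--     for i in range(1, 26):
--         chars = []
--         for t in tokens:
--             if isinstance(t, tuple):
--                 p, up = t
--                 c = alphabet[(p - i) % 26]
--                 chars.append(c.upper() if up else c)
--             else:
--                 chars.append(t)
--         lines.append('ROT %s: ' % i + ''.join(chars) + '\n')
--     return ''.join(lines)
-- ===== Notes on version B (the rewrite author's own statement) =====
-- stated objective: faster
-- what changed: B classifies each character once (alphabet index + case flag, or a literal) and derives all 25 rotations arithmetically from those indices with list-building and join, instead of re-scanning the text and searching the rotated alphabet with .index and string concatenation for every shift.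
import Mathlib
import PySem

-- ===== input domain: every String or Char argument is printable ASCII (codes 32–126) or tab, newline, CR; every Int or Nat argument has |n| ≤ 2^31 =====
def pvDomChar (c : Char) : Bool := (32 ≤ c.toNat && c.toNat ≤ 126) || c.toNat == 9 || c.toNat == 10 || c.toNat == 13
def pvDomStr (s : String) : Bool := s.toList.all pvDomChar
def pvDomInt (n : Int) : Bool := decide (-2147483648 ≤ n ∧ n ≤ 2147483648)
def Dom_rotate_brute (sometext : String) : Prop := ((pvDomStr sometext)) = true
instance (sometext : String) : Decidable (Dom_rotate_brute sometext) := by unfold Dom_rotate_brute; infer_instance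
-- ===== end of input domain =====

-- B classifies each character once (alphabet index + case flag, or literal) and fans the
-- recorded indices out to all 25 rotations arithmetically, instead of re-scanning the text
-- and re-searching the rotated alphabet with .index for every shift.

-- ===== PORT A =====
-- helper: the inner 'rotate(sometext, skip)' of A, on the char list
def pvRotateA (sometext : List Char) (skip : Int) : List Char :=
  let alphabet := "abcdefghijklmnopqrstuvwxyz".toList
  let skip := PySem.Int.mod skip 26
  let rot := PySem.List.slice alphabet (some skip) none ++ PySem.List.slice alphabet none (some skip)
  sometext.foldl (fun othertext x =>
    let ct : Int := if PySem.Chars.isupper x then 0 + 1 else 0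
    let x := if PySem.Chars.isupper x then PySem.Chars.lowerChar x else x
    if PySem.Chars.isIn [x] alphabet then
      -- guarded by 'x in alphabet', so rot.index(x) cannot raise; the getD default is unreachable
      let index := (PySem.List.index? rot x).getD 0
      let add := PySem.List.pyGetD alphabet (index : Int) 'a'
      let add := if ct == 1 then PySem.Chars.upperChar add else add
      othertext ++ [add]
    else
      othertext ++ [x]) []

def rotate_brute (sometext : String) : String :=
  String.ofList ((PySem.List.pyRange 1 26).foldl (fun brutejunk i =>
    brutejunk ++ ("ROT ".toList ++ PySem.Int.toChars i ++ ": ".toList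
      ++ pvRotateA sometext.toList i ++ "\n".toList)) [])

-- ===== PORT B =====
def pvClassify (ch : Char) : Sum (Nat × Bool) Char :=
  let alphabet := "abcdefghijklmnopqrstuvwxyz".toList
  let up := PySem.Chars.isupper ch
  let lc := if up then PySem.Chars.lowerChar ch else ch
  match PySem.List.index? alphabet lc with
  | some p => Sum.inl (p, up)
  | none => Sum.inr lc

def pvRender (i : Int) (t : Sum (Nat × Bool) Char) : Char :=
  let alphabet := "abcdefghijklmnopqrstuvwxyz".toList
  match t with
  | Sum.inl (p, up) =>
      let c := PySem.List.pyGetD alphabet (PySem.Int.mod ((p : Int) - i) 26) 'a'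
      if up then PySem.Chars.upperChar c else c
  | Sum.inr c => c

def rotate_brute_alt (sometext : String) : String :=
  let tokens := sometext.toList.map pvClassify
  let lines := (PySem.List.pyRange 1 26).map (fun i =>
    "ROT ".toList ++ PySem.Int.toChars i ++ ": ".toList ++ tokens.map (pvRender i) ++ "\n".toList)
  String.ofList lines.flatten

-- ===== PRECONDITION & SPEC =====
def Spec_rotate_brute (sometext : String) (out : String) : Prop := out = rotate_brute_alt sometext
instance (sometext : String) (out : String) : Decidable (Spec_rotate_brute sometext out) := by unfold Spec_rotate_brute; infer_instance

-- ===== CLAIM (what is proved, stated in full; the proofs are below) =====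
def Claim_equal_rotate_brute : Prop := ∀ (sometext : String), Dom_rotate_brute sometext → Spec_rotate_brute sometext (rotate_brute sometext)

-- ===== LEMMAS AND PROOFS =====

lemma pv_core : ∀ k : Nat, k < 26 → ∀ p : Nat, p < 26 →
    (PySem.List.pyGetD "abcdefghijklmnopqrstuvwxyz".toList
      (((PySem.List.index?
          (PySem.List.slice "abcdefghijklmnopqrstuvwxyz".toList (some (PySem.Int.mod (k : Int) 26)) none
            ++ PySem.List.slice "abcdefghijklmnopqrstuvwxyz".toList none (some (PySem.Int.mod (k : Int) 26)))
          ("abcdefghijklmnopqrstuvwxyz".toList.getD p 'a')).getD 0 : Int)) 'a')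
    = PySem.List.pyGetD "abcdefghijklmnopqrstuvwxyz".toList (PySem.Int.mod ((p : Int) - (k : Int)) 26) 'a' := by
  decide

lemma pv_step (i : Int) (h1 : 1 ≤ i) (h2 : i < 26) (x : Char) :
    (let alphabet := "abcdefghijklmnopqrstuvwxyz".toList
     let ct : Int := if PySem.Chars.isupper x then 0 + 1 else 0
     let x := if PySem.Chars.isupper x then PySem.Chars.lowerChar x else x
     if PySem.Chars.isIn [x] alphabet then
       let index := (PySem.List.index?
          (PySem.List.slice alphabet (some (PySem.Int.mod i 26)) none
            ++ PySem.List.slice alphabet none (some (PySem.Int.mod i 26))) x).getD 0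
       let add := PySem.List.pyGetD alphabet (index : Int) 'a'
       if ct == 1 then PySem.Chars.upperChar add else add
     else x)
    = pvRender i (pvClassify x) := by
  simp only [pvClassify, pvRender]
  set lc := if PySem.Chars.isupper x then PySem.Chars.lowerChar x else x with hlc
  rcases hidx : PySem.List.index? "abcdefghijklmnopqrstuvwxyz".toList lc with _ | p
  · have hmem := (PySem.List.index?_eq_none_iff _ _).mp hidx
    have hin : PySem.Chars.isIn [lc] "abcdefghijklmnopqrstuvwxyz".toList = false := by
      rw [PySem.Chars.isIn_eq_false_iff]
      exact fun h => hmem ((List.singleton_infix_iff lc _).mp h)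
    simp only [hin, Bool.false_eq_true, if_false]
  · obtain ⟨hp, hxp, -⟩ := PySem.List.getElem_of_index?_eq_some hidx
    have hp26 : p < 26 := by simpa using hp
    have hin : PySem.Chars.isIn [lc] "abcdefghijklmnopqrstuvwxyz".toList = true := by
      rw [PySem.Chars.isIn_iff_infix, List.singleton_infix_iff]
      exact hxp ▸ List.getElem_mem hp
    have hlcget : lc = "abcdefghijklmnopqrstuvwxyz".toList.getD p 'a' := by
      rw [List.getD_eq_getElem _ _ hp, hxp]
    obtain ⟨k, rfl, hk⟩ : ∃ k : Nat, i = (k : Int) ∧ k < 26 := by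
      refine ⟨i.toNat, (Int.toNat_of_nonneg (by omega)).symm, by omega⟩
    have hcore := pv_core k hk p hp26
    simp only [hin, if_true]
    rw [hlcget, hcore]
    cases hup : PySem.Chars.isupper x <;> simp

lemma pv_rotate_eq (l : List Char) (i : Int) (h1 : 1 ≤ i) (h2 : i < 26) :
    pvRotateA l i = (l.map pvClassify).map (pvRender i) := by
  simp only [pvRotateA]
  refine .trans (PySem.List.foldl_congr_mem l _ (fun acc x => acc ++ [pvRender i (pvClassify x)]) [] ?_) ?_
  · intro acc x hx
    rw [← apply_ite (fun t => acc ++ [t])]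
    exact congrArg (fun t => acc ++ [t]) (pv_step i h1 h2 x)
  · rw [PySem.List.foldl_append_singleton_eq_map, List.map_map]
    simp

lemma pv_main (s : String) : rotate_brute s = rotate_brute_alt s := by
  unfold rotate_brute rotate_brute_alt
  rw [PySem.List.foldl_append_eq_flatMap]
  simp only [List.nil_append]
  congr 1
  rw [List.flatMap_def]
  congr 1
  apply List.map_congr_left
  intro i hi
  obtain ⟨h1, h2⟩ := PySem.List.mem_pyRange_one.mp hi
  rw [pv_rotate_eq s.toList i h1 h2]

-- ===== VERDICT (by name: the statement is the Claim_ definition above) =====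
theorem rotate_brute_spec : Claim_equal_rotate_brute := by
  intro s _
  unfold Spec_rotate_brute
  exact pv_main s
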